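-- pv_equiv track=rewrite | github.com/laze-b/lazebot | lazebot/op_req.py | reqs_satisfied
-- ===== SOURCE A (Python) =====
-- def reqs_satisfied(relic_tier_reqs, unit_relic_tier):
--     """
--     Calculate the number of op requirements satisfied by a given unit relic tier. This will account for
--     the fact that the unit may be used in multiple phases by avoiding double counting across relic tiers.
--     For example, if the reqs are [5, 6] and the unit is 6, this would only count as satisfying 1 req since
--     a single unit could be applied multiple times.
--
--     :param relic_tier_reqs: (list of int) list of all op relic tier requirements
--     :param unit_relic_tier: (int) relic tier of the unit
--     :return: (int) count of relic tier requirements satisfied by the unit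
--     """
--     total_count = 0
--     matching = [rt for rt in relic_tier_reqs if rt <= unit_relic_tier]
--     for current_relic_tier in range(unit_relic_tier, 4, -1):
--         # add the current tier to the count
--         current_count = matching.count(current_relic_tier)
--         total_count += current_count
--         # remove lower tiers to prevent duplicate counting
--         for lower_tier in range(current_relic_tier - 1, 4, -1):
--             for x in range(current_count):
--                 if lower_tier in matching:
--                     matching.remove(lower_tier)
--         matching = [rt for rt in matching if rt < current_relic_tier]
--
--     return total_count
-- ===== SOURCE B (Python) =====
-- def reqs_satisfied(relic_tier_reqs, unit_relic_tier):
--     """Count of op relic-tier requirements satisfied, avoiding double counting.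
--
--     A single unit can be re-applied to one requirement of each tier it meets,
--     so the answer is the largest multiplicity of any single tier in the
--     countable range 5..unit_relic_tier.
--     """
--     counts = {}
--     for rt in relic_tier_reqs:
--         if 5 <= rt <= unit_relic_tier:
--             counts[rt] = counts.get(rt, 0) + 1
--     return max(counts.values(), default=0)
-- ===== Notes on version B (the rewrite author's own statement) =====
-- stated objective: faster
-- what changed: Replaced the descending tier simulation (a range(unit_relic_tier,4,-1) loop with repeated list.count/.remove/filter passes) by a single counting pass: the clamped cascading removals make the total equal the maximum multiplicity of any tier in [5, unit_relic_tier], so B builds one counter and returns its max value.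
import Mathlib
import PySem

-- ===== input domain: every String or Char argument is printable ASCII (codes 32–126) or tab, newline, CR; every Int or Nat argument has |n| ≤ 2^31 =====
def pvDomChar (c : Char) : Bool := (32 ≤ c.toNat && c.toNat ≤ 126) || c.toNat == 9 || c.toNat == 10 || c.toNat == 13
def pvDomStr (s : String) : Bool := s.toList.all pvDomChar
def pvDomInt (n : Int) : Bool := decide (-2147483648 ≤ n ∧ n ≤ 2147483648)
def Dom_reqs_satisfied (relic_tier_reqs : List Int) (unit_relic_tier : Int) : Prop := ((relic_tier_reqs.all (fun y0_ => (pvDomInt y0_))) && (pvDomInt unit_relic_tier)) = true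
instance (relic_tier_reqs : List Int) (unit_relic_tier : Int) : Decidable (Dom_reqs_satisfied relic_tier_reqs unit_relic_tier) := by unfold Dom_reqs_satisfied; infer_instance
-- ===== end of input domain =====

-- B replaces A's descending-tier simulation with one counting pass and returns the
-- largest per-tier multiplicity (objective: faster, O(n) instead of O(u·n)).

-- ===== PORT A =====
-- 'if lower_tier in matching: matching.remove(lower_tier)' (guarded, so remove never raises)
def pvARemoveOnce (m : List Int) (l : Int) : List Int :=
  if m.contains l then (PySem.List.remove? m l).getD m else m

-- 'for x in range(current_count): …'
def pvARemoveK (m : List Int) (l : Int) (k : Int) : List Int :=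
  (PySem.List.pyRange 0 k 1).foldl (fun m _ => pvARemoveOnce m l) m

-- one iteration of 'for current_relic_tier in range(unit_relic_tier, 4, -1)'
def pvABody (st : Int × List Int) (t : Int) : Int × List Int :=
  let current_count : Int := (st.2.count t : Int)
  let m := (PySem.List.pyRange (t - 1) 4 (-1)).foldl (fun m l => pvARemoveK m l current_count) st.2
  (st.1 + current_count, m.filter (fun rt => rt < t))

def reqs_satisfied (relic_tier_reqs : List Int) (unit_relic_tier : Int) : Int :=
  ((PySem.List.pyRange unit_relic_tier 4 (-1)).foldl pvABody
    (0, relic_tier_reqs.filter (fun rt => rt ≤ unit_relic_tier))).1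

-- ===== PORT B =====
def reqs_satisfied_alt (relic_tier_reqs : List Int) (unit_relic_tier : Int) : Int :=
  match PySem.List.max?
      (relic_tier_reqs.foldl
        (fun (d : PySem.Dict Int Int) rt =>
          if 5 ≤ rt ∧ rt ≤ unit_relic_tier then d.insert rt (d.getD rt 0 + 1) else d)
        PySem.Dict.empty).values (fun y => y) with
  | some m => m
  | none => 0

-- ===== PRECONDITION & SPEC =====
def Spec_reqs_satisfied (relic_tier_reqs : List Int) (unit_relic_tier : Int) (out : Int) : Prop := out = reqs_satisfied_alt relic_tier_reqs unit_relic_tier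
instance (relic_tier_reqs : List Int) (unit_relic_tier : Int) (out : Int) : Decidable (Spec_reqs_satisfied relic_tier_reqs unit_relic_tier out) := by unfold Spec_reqs_satisfied; infer_instance

-- ===== CLAIM (what is proved, stated in full; the proofs are below) =====
def Claim_equal_reqs_satisfied : Prop := ∀ (relic_tier_reqs : List Int) (unit_relic_tier : Int), Dom_reqs_satisfied relic_tier_reqs unit_relic_tier → Spec_reqs_satisfied relic_tier_reqs unit_relic_tier (reqs_satisfied relic_tier_reqs unit_relic_tier)

-- ===== LEMMAS AND PROOFS =====

-- generic facts about running max folds over Int lists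
theorem foldl_max_le_iff (l : List Int) (a x : Int) :
    l.foldl max a ≤ x ↔ a ≤ x ∧ ∀ y ∈ l, y ≤ x := by
  induction l generalizing a with
  | nil => simp
  | cons h t ih =>
    simp only [List.foldl_cons, ih, List.mem_cons]
    constructor
    · rintro ⟨hm, hall⟩
      exact ⟨le_trans (le_max_left _ _) hm, fun y hy => hy.elim (fun e => e ▸ le_trans (le_max_right _ _) hm) (hall y)⟩
    · rintro ⟨ha, hall⟩
      exact ⟨max_le ha (hall h (Or.inl rfl)), fun y hy => hall y (Or.inr hy)⟩

theorem le_foldl_max_of_mem {l : List Int} {y : Int} (hy : y ∈ l) (a : Int) :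
    y ≤ l.foldl max a := by
  induction l generalizing a with
  | nil => cases hy
  | cons h t ih =>
    rcases List.mem_cons.mp hy with rfl | hy'
    · exact le_trans (le_max_right _ _) ((foldl_max_le_iff t _ _).mp le_rfl).1
    · exact ih hy' _

theorem init_le_foldl_max (l : List Int) (a : Int) : a ≤ l.foldl max a :=
  ((foldl_max_le_iff l a _).mp le_rfl).1

-- counts after one guarded remove
theorem count_pvARemoveOnce (m : List Int) (l v : Int) :
    (pvARemoveOnce m l).count v = if v = l then m.count l - 1 else m.count v := by
  unfold pvARemoveOnce
  by_cases hm : l ∈ m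
  · rw [if_pos (List.contains_iff_mem.mpr hm), PySem.List.remove?_eq_some_erase _ _ hm]
    simp only [Option.getD_some]
    split_ifs with hv
    · subst hv; exact List.count_erase_self
    · exact List.count_erase_of_ne hv
  · rw [if_neg (by simpa using hm)]
    split_ifs with hv
    · subst hv; simp [List.count_eq_zero_of_not_mem hm]
    · rfl

-- counts after removing k times
theorem count_iter_remove (L : List Int) (m : List Int) (l v : Int) :
    (L.foldl (fun m _ => pvARemoveOnce m l) m).count v
      = if v = l then m.count l - L.length else m.count v := by
  induction L generalizing m with
  | nil =>
    simp only [List.foldl_nil, List.length_nil]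
    split_ifs with hv
    · subst hv; simp
    · rfl
  | cons h t ih =>
    simp only [List.foldl_cons, ih, count_pvARemoveOnce, List.length_cons]
    split_ifs with hv
    · subst hv; omega
    · rfl

theorem count_pvARemoveK (m : List Int) (l v k : Int) :
    (pvARemoveK m l k).count v = if v = l then m.count l - k.toNat else m.count v := by
  unfold pvARemoveK
  rw [count_iter_remove, PySem.List.length_pyRange_one]
  simp

-- counts after the 'remove lower tiers' double loop (over a duplicate-free tier list)
theorem count_inner (L : List Int) (hL : L.Nodup) (m : List Int) (k v : Int) :
    ((L.foldl (fun m l => pvARemoveK m l k) m).count v)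
      = if v ∈ L then m.count v - k.toNat else m.count v := by
  induction L generalizing m with
  | nil => simp
  | cons h t ih =>
    rcases List.nodup_cons.mp hL with ⟨hni, hnd⟩
    simp only [List.foldl_cons, ih hnd, count_pvARemoveK, List.mem_cons]
    by_cases hv : v = h
    · subst hv; simp [hni]
    · simp [hv]

theorem nodup_pyRange_neg_one (a b : Int) : (PySem.List.pyRange a b (-1)).Nodup := by
  rw [PySem.List.pyRange_neg_one_eq_reverse, List.nodup_reverse]
  exact PySem.List.nodup_pyRange_one _ _

-- arithmetic core: shifting the running max by the clamped subtraction
theorem key_max (l : List Int) : ∀ (a k : Int) (c c' : Int → Int), 0 ≤ a → 0 ≤ k →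
    (∀ v ∈ l, 0 ≤ c v ∧ c' v = max 0 (c v - k)) →
    k + (l.map c').foldl max a = (l.map c).foldl max (k + a) := by
  induction l with
  | nil => simp
  | cons h t ih =>
    intro a k c c' ha hk hall
    obtain ⟨hc, hc'⟩ := hall h (List.mem_cons_self ..)
    simp only [List.map_cons, List.foldl_cons]
    have : max (k + a) (c h) = k + max a (c' h) := by rw [hc']; omega
    rw [this, ih (max a (c' h)) k c c' (le_trans ha (le_max_left _ _)) hk
      (fun v hv => hall v (List.mem_cons_of_mem _ hv))]

-- main invariant for A's outer loop
theorem Aloop (n : Nat) : ∀ (t : Int) (m : List Int) (S : Int), (t - 4).toNat = n →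
    (∀ x ∈ m, x ≤ t) →
    ((PySem.List.pyRange t 4 (-1)).foldl pvABody (S, m)).1
      = S + ((PySem.List.pyRange t 4 (-1)).map (fun v => (m.count v : Int))).foldl max 0 := by
  induction n with
  | zero =>
    intro t m S hn _
    rw [PySem.List.pyRange_neg_one_eq_nil (by omega)]
    simp
  | succ n ih =>
    intro t m S hn hle
    have ht : (4 : Int) < t := by omega
    rw [PySem.List.pyRange_neg_one_cons ht]
    simp only [List.foldl_cons, List.map_cons, List.foldl_cons]
    set k : Int := (m.count t : Int) with hk
    set m' := ((PySem.List.pyRange (t - 1) 4 (-1)).foldl (fun m l => pvARemoveK m l k) m).filter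
      (fun rt => rt < t) with hm'
    have hbody : pvABody (S, m) t = (S + k, m') := rfl
    rw [hbody]
    have hle' : ∀ x ∈ m', x ≤ t - 1 := by
      intro x hx
      have := (List.mem_filter.mp hx).2
      simp only [decide_eq_true_eq] at this
      omega
    rw [ih (t - 1) m' (S + k) (by omega) hle']
    -- counts in m' on the remaining range are the clamped originals
    have hcnt : ∀ v ∈ PySem.List.pyRange (t - 1) 4 (-1),
        (m'.count v : Int) = max 0 ((m.count v : Int) - k) := by
      intro v hv
      rcases (PySem.List.mem_pyRange_neg_one).mp hv with ⟨hv4, hvt⟩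
      rw [hm', List.count_filter (by simp; omega)]
      rw [count_inner _ (nodup_pyRange_neg_one _ _) m k v, if_pos hv]
      have : k.toNat = m.count t := by simp [hk]
      omega
    have harith := key_max (PySem.List.pyRange (t - 1) 4 (-1)) 0 k
      (fun v => (m.count v : Int)) (fun v => (m'.count v : Int)) le_rfl
      (by simp [hk]) (fun v hv => ⟨Int.natCast_nonneg _, hcnt v hv⟩)
    simp only [add_zero] at harith
    have hmax0 : max 0 k = k := by simp [hk]
    rw [hmax0]
    omega

-- B's conditional counting fold is a plain counter of the filtered list
theorem condfold (u : Int) (reqs : List Int) : ∀ (d : PySem.Dict Int Int),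
    reqs.foldl (fun d rt => if 5 ≤ rt ∧ rt ≤ u then d.insert rt (d.getD rt 0 + 1) else d) d
      = (reqs.filter (fun rt => decide (5 ≤ rt) && decide (rt ≤ u))).foldl
          (fun d rt => d.insert rt (d.getD rt 0 + 1)) d := by
  induction reqs with
  | nil => intro d; rfl
  | cons h t ih =>
    intro d
    simp only [List.foldl_cons, List.filter_cons]
    by_cases hc : 5 ≤ h ∧ h ≤ u
    · rw [if_pos hc, if_pos (by simp [hc.1, hc.2])]
      simp only [List.foldl_cons]
      exact ih _
    · rw [if_neg hc, if_neg (by simpa [Decidable.not_and_iff_or_not] using hc)]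
      exact ih d

-- ===== VERDICT (by name: the statement is the Claim_ definition above) =====
theorem reqs_satisfied_spec : Claim_equal_reqs_satisfied := by
  intro reqs u _
  unfold Spec_reqs_satisfied reqs_satisfied reqs_satisfied_alt
  set xs' := reqs.filter (fun rt => decide (5 ≤ rt) && decide (rt ≤ u)) with hxs'
  set c : Int → Int := fun v => (xs'.count v : Int) with hc
  -- A's value is the running max of counts over the countdown range
  have hmc : ∀ v ∈ PySem.List.pyRange u 4 (-1),
      ((reqs.filter (fun rt => rt ≤ u)).count v : Int) = c v := by
    intro v hv
    rcases (PySem.List.mem_pyRange_neg_one).mp hv with ⟨hv4, hvu⟩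
    rw [hc, hxs']
    congr 1
    rw [List.count_filter (by simp [hvu]), List.count_filter (by simp; omega)]
  have hA := Aloop (u - 4).toNat u (reqs.filter (fun rt => rt ≤ u)) 0 rfl
    (fun x hx => by simpa using (List.mem_filter.mp hx).2)
  rw [hA, List.map_congr_left hmc, zero_add]
  -- B's value
  rw [condfold, PySem.Dict.foldl_insert_getD_add_one_eq_counter]
  rw [PySem.Dict.values_eq_map_keys _ (PySem.Dict.nodup_keys_counter _) 0,
    PySem.Dict.keys_counter]
  have hvals : (PySem.Set.ofList xs').map (fun k => (PySem.Dict.counter xs').getD k 0)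
      = (PySem.Set.ofList xs').map c := by
    apply List.map_congr_left
    intro k _
    rw [PySem.Dict.getD_counter]
  rw [hvals]
  -- compare the two maxima
  rcases hset : PySem.Set.ofList xs' with _ | ⟨x, t⟩
  · -- no countable tier present: every count in the range is zero
    simp only [List.map_nil, PySem.List.max?]
    have hempty : xs' = [] := by
      have := PySem.Set.mem_ofList xs'
      rcases xs' with _ | ⟨y, ys⟩
      · rfl
      · exfalso
        have : y ∈ PySem.Set.ofList (y :: ys) := (PySem.Set.mem_ofList _ _).mpr (List.mem_cons_self ..)
        rw [hset] at this; cases this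
    refine le_antisymm ?_ ?_
    · rw [foldl_max_le_iff]
      refine ⟨le_rfl, fun y hy => ?_⟩
      rcases List.mem_map.mp hy with ⟨v, _, rfl⟩
      simp [hc, hempty]
    · exact init_le_foldl_max _ _
  · -- some tier present: Python max(values) is the fold of max from the head
    simp only [List.map_cons]
    have hx : x ∈ xs' := (PySem.Set.mem_ofList _ _).mp (by rw [hset]; exact List.mem_cons_self ..)
    have hmax : PySem.List.max? (c x :: t.map c) (fun y => y)
        = some ((t.map c).foldl max (c x)) := PySem.List.max?_id_cons ..
    rw [hmax]
    have hsub : ∀ w ∈ PySem.Set.ofList xs', w ∈ xs' := fun w hw => (PySem.Set.mem_ofList _ _).mp hw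
    refine le_antisymm ?_ ?_
    · rw [foldl_max_le_iff]
      constructor
      · calc (0 : Int) ≤ c x := Int.natCast_nonneg _
          _ ≤ _ := init_le_foldl_max _ _
      · intro y hy
        rcases List.mem_map.mp hy with ⟨v, hv, rfl⟩
        by_cases hvx : v ∈ xs'
        · have : v ∈ PySem.Set.ofList xs' := (PySem.Set.mem_ofList _ _).mpr hvx
          rw [hset] at this
          rcases List.mem_cons.mp this with rfl | hvt
          · exact init_le_foldl_max _ _
          · exact le_foldl_max_of_mem (List.mem_map_of_mem hvt) _
        · have : c v = 0 := by simp [hc, List.count_eq_zero_of_not_mem hvx]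
          rw [this]
          calc (0 : Int) ≤ c x := Int.natCast_nonneg _
            _ ≤ _ := init_le_foldl_max _ _
    · rw [foldl_max_le_iff]
      have hrange : ∀ v, v ∈ xs' → c v ≤ (PySem.List.pyRange u 4 (-1)).foldl (fun a v => max a (c v)) 0 := by
        intro v hv
        have hvmem : v ∈ PySem.List.pyRange u 4 (-1) := by
          rw [PySem.List.mem_pyRange_neg_one]
          have := List.mem_filter.mp (hxs' ▸ hv)
          simp only [Bool.and_eq_true, decide_eq_true_eq] at this
          omega
        have := le_foldl_max_of_mem (List.mem_map_of_mem (f := c) hvmem) (0 : Int)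
        simpa [List.foldl_map] using this
      constructor
      · have := hrange x hx
        simpa [List.foldl_map] using this
      · intro y hy
        rcases List.mem_map.mp hy with ⟨w, hw, rfl⟩
        have hwxs : w ∈ xs' := hsub w (by rw [hset]; exact List.mem_cons_of_mem _ hw)
        have := hrange w hwxs
        simpa [List.foldl_map] using this
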